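-- pv_equiv track=rewrite | github.com/astro-stan/librsync-py | header_cleaner.py | _is_line_allowed
-- ===== SOURCE A (Python) =====
-- def _is_line_allowed(header: str, line: int, allowlist: dict[str, set]) -> bool:
--     """Check if a line in a header is allowlisted."""
--     full_list: set = set()
--
--     for key, value in allowlist.items():
--         if not key or header.endswith(str(key)):
--             full_list = full_list.union(value)
--
--     if not full_list:
--         return True
--
--     return any(line >= from_ and (line <= to or to == -1) for from_, to in full_list)
-- ===== SOURCE B (Python) =====
-- def _is_line_allowed(header: str, line: int, allowlist: dict[str, set]) -> bool:
--     """Invert the traversal: for each distinct key length, look the suffix of the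
--     header of that length up in the dict, instead of scanning the dict and
--     testing endswith on every key."""
--     matched = False
--     for length in {len(key) for key in allowlist}:
--         if length > len(header):
--             continue
--         value = allowlist.get(header[len(header) - length:])
--         if value is None:
--             continue
--         for from_, to in value:
--             matched = True
--             if line >= from_ and (line <= to or to == -1):
--                 return True
--     return not matched
-- ===== Notes on version B (the rewrite author's own statement) =====
-- stated objective: alternative
-- what changed: B inverts the traversal: for each distinct key length it looks the header suffix of that length up in the dict, instead of scanning the dict, running endswith on every key and materialising a union set; ranges are streamed with an early return and a matched flag.
import Mathlib
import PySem

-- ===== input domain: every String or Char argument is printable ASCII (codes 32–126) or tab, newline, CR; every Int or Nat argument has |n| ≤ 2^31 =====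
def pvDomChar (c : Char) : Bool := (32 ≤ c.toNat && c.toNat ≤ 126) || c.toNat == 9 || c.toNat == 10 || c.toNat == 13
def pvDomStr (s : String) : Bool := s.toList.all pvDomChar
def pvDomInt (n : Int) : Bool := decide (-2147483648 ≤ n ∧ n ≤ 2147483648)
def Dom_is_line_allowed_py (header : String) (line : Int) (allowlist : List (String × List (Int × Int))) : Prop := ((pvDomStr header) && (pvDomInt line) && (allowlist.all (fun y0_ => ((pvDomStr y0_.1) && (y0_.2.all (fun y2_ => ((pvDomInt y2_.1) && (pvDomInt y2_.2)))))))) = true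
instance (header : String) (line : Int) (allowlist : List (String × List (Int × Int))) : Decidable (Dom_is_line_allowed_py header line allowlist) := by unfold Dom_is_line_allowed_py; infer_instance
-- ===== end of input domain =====

-- B inverts the traversal: for each distinct key length it looks the header suffix of that
-- length up in the dict (early return, matched flag) instead of scanning the dict, testing
-- endswith per key and materialising a union set — an alternative algorithm.

-- ===== PORT A =====
-- the range test 'line >= from_ and (line <= to or to == -1)'
def pvRangeHit (line : Int) (ft : Int × Int) : Bool :=
  decide (line ≥ ft.1) && (decide (line ≤ ft.2) || decide (ft.2 = -1))

def is_line_allowed_py (header : String) (line : Int) (allowlist : List (String × List (Int × Int))) : Bool :=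
  -- full_list accumulated by the for-loop over allowlist.items()
  let full_list : PySem.Set (Int × Int) :=
    allowlist.foldl
      (fun fl kv =>
        if kv.1 = "" || PySem.Str.endswith header kv.1 then PySem.Set.union fl kv.2 else fl)
      PySem.Set.empty
  if full_list.isEmpty then true
  else full_list.any (pvRangeHit line)  -- any(...) over the set: order-independent

-- ===== PORT B =====
-- allowlist.get(k): first match in the association list (dict lookup under the convention)
def pvGetFirst (aw : List (String × List (Int × Int))) (k : List Char) : Option (List (Int × Int)) :=
  match aw with
  | [] => none
  | kv :: rest => if kv.1.toList = k then some kv.2 else pvGetFirst rest k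

-- inner 'for from_, to in value' loop: (early-return-True?, matched flag after the loop)
def pvBInner (line : Int) : List (Int × Int) → Bool → Bool × Bool
  | [], matched => (false, matched)
  | ft :: rest, _ =>
    if pvRangeHit line ft then (true, true) else pvBInner line rest true

-- outer 'for length in {len(key) for key in allowlist}' loop with the matched accumulator
def pvBLoop (header : List Char) (line : Int) (aw : List (String × List (Int × Int))) :
    List Nat → Bool → Bool
  | [], matched => !matched
  | L :: rest, matched =>
    if header.length < L then pvBLoop header line aw rest matched  -- 'continue'
    else
      match pvGetFirst aw (header.drop (header.length - L)) with
      | none => pvBLoop header line aw rest matched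
      | some v =>
        match pvBInner line v matched with
        | (true, _) => true
        | (false, matched') => pvBLoop header line aw rest matched'

def is_line_allowed_py_alt (header : String) (line : Int) (allowlist : List (String × List (Int × Int))) : Bool :=
  pvBLoop header.toList line allowlist
    (PySem.Set.ofList (allowlist.map (fun kv => kv.1.toList.length))) false

-- ===== PRECONDITION & SPEC =====
-- Pre_ excludes association lists with duplicate keys: they cannot arise from a Python dict
-- (the argument's actual type), and on them the list representation is ambiguous (A unions all
-- entries, a dict lookup sees only one).
def Pre_is_line_allowed_py (header : String) (line : Int) (allowlist : List (String × List (Int × Int))) : Prop :=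
  (allowlist.map Prod.fst).Nodup
instance (header : String) (line : Int) (allowlist : List (String × List (Int × Int))) : Decidable (Pre_is_line_allowed_py header line allowlist) := by unfold Pre_is_line_allowed_py; infer_instance

def pvWitness_is_line_allowed_py : String × Int × (List (String × List (Int × Int))) :=
  ("ab", 3, [("b", [(1, 3)]), ("zz", [(0, 0)])])

def Spec_is_line_allowed_py (header : String) (line : Int) (allowlist : List (String × List (Int × Int))) (out : Bool) : Prop := out = is_line_allowed_py_alt header line allowlist
instance (header : String) (line : Int) (allowlist : List (String × List (Int × Int))) (out : Bool) : Decidable (Spec_is_line_allowed_py header line allowlist out) := by unfold Spec_is_line_allowed_py; infer_instance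

-- ===== CLAIM (what is proved, stated in full; the proofs are below) =====
def Claim_equal_is_line_allowed_py : Prop := ∀ (header : String) (line : Int) (allowlist : List (String × List (Int × Int))), Dom_is_line_allowed_py header line allowlist → Pre_is_line_allowed_py header line allowlist → Spec_is_line_allowed_py header line allowlist (is_line_allowed_py header line allowlist)

-- ===== LEMMAS AND PROOFS =====

-- the multiset of ranges contributed by matching keys, in A's order
def pvKept (header : String) (allowlist : List (String × List (Int × Int))) : List (Int × Int) :=
  (allowlist.filter (fun kv => kv.1 = "" || PySem.Str.endswith header kv.1)).flatMap Prod.snd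

-- the ranges B's traversal visits, in B's order
def pvKeptF (header : String) (allowlist : List (String × List (Int × Int))) (L : Nat) : List (Int × Int) :=
  if header.toList.length < L then []
  else (pvGetFirst allowlist (header.toList.drop (header.toList.length - L))).getD []

def pvKeptB (header : String) (allowlist : List (String × List (Int × Int))) : List (Int × Int) :=
  (PySem.Set.ofList (allowlist.map (fun kv => kv.1.toList.length))).flatMap
    (pvKeptF header allowlist)

theorem pvKept_cons (header : String) (kv : String × List (Int × Int))
    (rest : List (String × List (Int × Int))) :
    pvKept header (kv :: rest) =
      if kv.1 = "" ∨ PySem.Chars.endswith header.toList kv.1.toList = true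
      then kv.2 ++ pvKept header rest
      else pvKept header rest := by
  unfold pvKept
  by_cases h : kv.1 = "" ∨ PySem.Chars.endswith header.toList kv.1.toList = true <;>
    simp [h, PySem.Str.endswith]

theorem pvBInner_eq (line : Int) (v : List (Int × Int)) (m : Bool) :
    pvBInner line v m = (v.any (pvRangeHit line), m || !v.isEmpty) := by
  induction v generalizing m with
  | nil => simp [pvBInner]
  | cons ft rest ih =>
    by_cases h : pvRangeHit line ft = true <;> simp [pvBInner, h, ih]

theorem pvBLoop_eq (hs : String) (line : Int)
    (aw : List (String × List (Int × Int))) (idxs : List Nat) (m : Bool) :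
    pvBLoop hs.toList line aw idxs m =
      (if idxs.flatMap (pvKeptF hs aw) = [] then !m
       else (idxs.flatMap (pvKeptF hs aw)).any (pvRangeHit line)) := by
  induction idxs generalizing m with
  | nil => simp [pvBLoop]
  | cons L rest ih =>
    simp only [List.flatMap_cons]
    by_cases hL : hs.toList.length < L
    · rw [pvBLoop, if_pos hL, ih]
      have hf : pvKeptF hs aw L = [] := by unfold pvKeptF; rw [if_pos hL]
      rw [hf, List.nil_append]
    · rw [pvBLoop, if_neg hL]
      cases hg : pvGetFirst aw (hs.toList.drop (hs.toList.length - L)) with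
      | none =>
        have hf : pvKeptF hs aw L = [] := by unfold pvKeptF; rw [if_neg hL, hg]; rfl
        rw [ih, hf, List.nil_append]
      | some v =>
        have hf : pvKeptF hs aw L = v := by unfold pvKeptF; rw [if_neg hL, hg]; rfl
        simp only [pvBInner_eq, hf]
        cases hv : v.any (pvRangeHit line) with
        | true =>
          have hvne : v ≠ [] := by rintro rfl; simp at hv
          simp [hvne, hv]
        | false =>
          show pvBLoop hs.toList line aw rest (m || !v.isEmpty) = _
          rw [ih]
          cases v with
          | nil => simp
          | cons y v' =>
            simp only [List.any_cons, Bool.or_eq_false_iff] at hv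
            by_cases h3 : rest.flatMap (pvKeptF hs aw) = [] <;>
              simp [h3, hv.1, hv.2]

-- membership in A's accumulated set after the fold
theorem pv_fold_mem (header : String) (aw : List (String × List (Int × Int)))
    (s : PySem.Set (Int × Int)) (x : Int × Int) :
    x ∈ aw.foldl
        (fun fl kv =>
          if kv.1 = "" || PySem.Str.endswith header kv.1 then PySem.Set.union fl kv.2 else fl) s
      ↔ x ∈ s ∨ x ∈ pvKept header aw := by
  induction aw generalizing s with
  | nil => simp [pvKept]
  | cons kv rest ih =>
    rw [List.foldl_cons, ih, pvKept_cons]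
    by_cases hk : kv.1 = "" ∨ PySem.Chars.endswith header.toList kv.1.toList = true
    · have hb : (kv.1 = "" || PySem.Str.endswith header kv.1) = true := by
        simpa [PySem.Str.endswith] using hk
      rw [if_pos hb, if_pos hk]
      simp [PySem.Set.mem_union, or_assoc]
    · have hb : ¬ ((kv.1 = "" || PySem.Str.endswith header kv.1) = true) := by
        simpa [PySem.Str.endswith] using hk
      rw [if_neg hb, if_neg hk]

-- pvGetFirst is the first match; with nodup keys it is THE match
theorem pvGetFirst_some (aw : List (String × List (Int × Int))) (k : List Char)
    (v : List (Int × Int)) (h : pvGetFirst aw k = some v) :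
    ∃ kv ∈ aw, kv.1.toList = k ∧ kv.2 = v := by
  induction aw with
  | nil => simp [pvGetFirst] at h
  | cons kv rest ih =>
    by_cases hk : kv.1.toList = k
    · simp only [pvGetFirst, if_pos hk, Option.some.injEq] at h
      exact ⟨kv, List.mem_cons_self, hk, h⟩
    · simp only [pvGetFirst, if_neg hk] at h
      obtain ⟨kv', hmem, hk', hv'⟩ := ih h
      exact ⟨kv', List.mem_cons_of_mem _ hmem, hk', hv'⟩

theorem pvGetFirst_of_mem (aw : List (String × List (Int × Int)))
    (hnd : (aw.map Prod.fst).Nodup) (kv : String × List (Int × Int)) (hmem : kv ∈ aw) :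
    pvGetFirst aw kv.1.toList = some kv.2 := by
  induction aw with
  | nil => simp at hmem
  | cons kv0 rest ih =>
    simp only [List.map_cons, List.nodup_cons] at hnd
    rcases List.mem_cons.mp hmem with rfl | hmem'
    · simp [pvGetFirst]
    · have hne : ¬ (kv0.1.toList = kv.1.toList) := by
        intro he
        exact hnd.1 (by
          have h2 : kv0.1 = kv.1 := by
            have h3 := congrArg String.ofList he; simpa using h3
          exact h2 ▸ List.mem_map_of_mem hmem')
      rw [pvGetFirst, if_neg hne]
      exact ih hnd.2 hmem'

-- suffix characterization of A's key test
theorem pvMatch_iff_suffix (header k : String) :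
    (k = "" ∨ PySem.Chars.endswith header.toList k.toList = true) ↔
      k.toList <:+ header.toList := by
  rw [PySem.Chars.endswith_iff]
  constructor
  · rintro (rfl | h)
    · exact List.nil_suffix
    · exact h
  · exact fun h => Or.inr h

-- membership agrees between the two kept lists (nodup keys)
theorem pvKeptB_mem (header : String) (aw : List (String × List (Int × Int)))
    (hnd : (aw.map Prod.fst).Nodup) (x : Int × Int) :
    x ∈ pvKeptB header aw ↔ x ∈ pvKept header aw := by
  unfold pvKeptB pvKept
  simp only [List.mem_flatMap, List.mem_filter]
  constructor
  · rintro ⟨L, hL, hx⟩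
    unfold pvKeptF at hx
    by_cases hlt : header.toList.length < L
    · rw [if_pos hlt] at hx; simp at hx
    · rw [if_neg hlt] at hx
      cases hg : pvGetFirst aw (header.toList.drop (header.toList.length - L)) with
      | none => rw [hg] at hx; simp at hx
      | some v =>
        rw [hg] at hx; simp only [Option.getD_some] at hx
        obtain ⟨kv, hmem, hk, hv⟩ := pvGetFirst_some _ _ _ hg
        refine ⟨kv, ⟨hmem, ?_⟩, hv ▸ hx⟩
        have hsuf : kv.1.toList <:+ header.toList := hk ▸ List.drop_suffix _ _
        simpa [PySem.Str.endswith] using (pvMatch_iff_suffix header kv.1).mpr hsuf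
  · rintro ⟨kv, ⟨hmem, hcond⟩, hx⟩
    have hsuf : kv.1.toList <:+ header.toList := by
      apply (pvMatch_iff_suffix header kv.1).mp
      simpa [PySem.Str.endswith] using hcond
    obtain ⟨t, ht⟩ := hsuf
    have hlen : t.length + kv.1.toList.length = header.toList.length := by
      rw [← ht]; simp
    refine ⟨kv.1.toList.length, ?_, ?_⟩
    · exact (PySem.Set.mem_ofList _ _).mpr (List.mem_map_of_mem hmem)
    · unfold pvKeptF
      rw [if_neg (by omega)]
      have hdrop : header.toList.drop (header.toList.length - kv.1.toList.length) = kv.1.toList := by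
        have h2 : header.toList.length - kv.1.toList.length = t.length := by omega
        rw [h2, ← ht]; simp
      rw [hdrop, pvGetFirst_of_mem aw hnd kv hmem]
      simpa using hx

-- ===== VERDICT (by name: the statement is the Claim_ definition above) =====
theorem is_line_allowed_py_spec : Claim_equal_is_line_allowed_py := by
  intro header line allowlist _ hpre
  unfold Spec_is_line_allowed_py is_line_allowed_py is_line_allowed_py_alt
  rw [pvBLoop_eq]
  have hKB : (PySem.Set.ofList (allowlist.map (fun kv => kv.1.toList.length))).flatMap
      (pvKeptF header allowlist) = pvKeptB header allowlist := rfl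
  rw [hKB]
  set S := allowlist.foldl
      (fun fl kv =>
        if kv.1 = "" || PySem.Str.endswith header kv.1 then PySem.Set.union fl kv.2 else fl)
      PySem.Set.empty with hS
  have hmemA : ∀ x, x ∈ S ↔ x ∈ pvKept header allowlist := by
    intro x
    rw [hS, pv_fold_mem]
    simp [PySem.Set.empty]
  have hmem : ∀ x, x ∈ S ↔ x ∈ pvKeptB header allowlist := by
    intro x; rw [hmemA, pvKeptB_mem header allowlist hpre]
  by_cases hE : pvKeptB header allowlist = []
  · have hSnil : S = [] := by
      apply List.eq_nil_iff_forall_not_mem.mpr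
      intro x hx
      exact (List.not_mem_nil (a := x)) (hE ▸ (hmem x).mp hx)
    simp [hSnil, hE]
  · have hSne : S.isEmpty = false := by
      obtain ⟨x, hx⟩ := List.exists_mem_of_ne_nil _ hE
      exact List.isEmpty_eq_false_iff_exists_mem.mpr ⟨x, (hmem x).mpr hx⟩
    have hany : S.any (pvRangeHit line) = (pvKeptB header allowlist).any (pvRangeHit line) := by
      cases hA : (pvKeptB header allowlist).any (pvRangeHit line)
      · simp only [List.any_eq_false] at hA ⊢
        intro x hx; exact hA x ((hmem x).mp hx)
      · simp only [List.any_eq_true] at hA ⊢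
        obtain ⟨x, hx, hp⟩ := hA
        exact ⟨x, (hmem x).mpr hx, hp⟩
    simp only [hSne, hany]
    cases hA : (pvKeptB header allowlist).any (pvRangeHit line) <;> simp [hE]
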